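-- pv_equiv track=rewrite | github.com/tttr222/gcn_ddi | dataset/xml_convert.py | apply_bilou
-- ===== SOURCE A (Python) =====
-- def apply_bilou(ctype,cid):
--     assert(len(ctype) == len(cid))
--     tags = ['O'] * len(cid)
--
--     for i in range(len(tags)):
--         if cid[i] == None:
--             continue
--
--         tags[i] = '{}-{}'.format('I',ctype[i])
--
--     for i in range(1,len(tags)):
--         if ctype[i] is not None and cid[i] != cid[i-1]:
--             tags[i] = '{}-{}'.format('B',ctype[i])
--
--     for i in range(0,len(tags)-1):
--         if ctype[i] is not None and cid[i] != cid[i+1]: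
--             tags[i] = '{}-{}'.format('L',ctype[i])
--
--     for i in range(0,len(tags)-1):
--         if ctype[i] is not None and cid[i] != cid[i+1] and cid[i] != cid[i-1]:
--             tags[i] = '{}-{}'.format('U',ctype[i])
--
--     if ctype[0] is not None:
--         if cid[0] != cid[1]:
--             tags[0] = '{}-{}'.format('U',ctype[0])
--         else:
--             tags[0] = '{}-{}'.format('B',ctype[0])
--
--     if ctype[-1] is not None:
--         if cid[-1] != cid[-2]:
--             tags[-1] = '{}-{}'.format('U',ctype[-1])
--         else:
--             tags[-1] = '{}-{}'.format('L',ctype[-1])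
--
--     return tags
-- ===== SOURCE B (Python) =====
-- def apply_bilou(ctype, cid):
--     assert(len(ctype) == len(cid))
--     n = len(cid)
--
--     def fmt(prefix, t):
--         return '{}-{}'.format(prefix, t)
--
--     tags = []
--     for i in range(n):
--         t = ctype[i]
--         if t is None:
--             tags.append(fmt('I', t) if cid[i] is not None else 'O')
--         elif i == 0:
--             tags.append(fmt('U', t) if (n == 1 or cid[0] != cid[1]) else fmt('B', t))
--         elif i == n - 1:
--             tags.append(fmt('U', t) if cid[i] != cid[i - 1] else fmt('L', t))
--         elif cid[i] != cid[i - 1] and cid[i] != cid[i + 1]: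
--             tags.append(fmt('U', t))
--         elif cid[i] != cid[i + 1]:
--             tags.append(fmt('L', t))
--         elif cid[i] != cid[i - 1]:
--             tags.append(fmt('B', t))
--         else:
--             tags.append(fmt('I', t) if cid[i] is not None else 'O')
--     return tags
-- ===== Notes on version B (the rewrite author's own statement) =====
-- stated objective: simpler
-- what changed: Replaces A's four overwriting passes over the whole list plus two endpoint-override blocks with a single pass that decides each token's BILOU tag directly from its neighbours.
-- outside the precondition, e.g. on apply_bilou([], []): A raises IndexError, B returns []; on apply_bilou(['drug'], ['d1']): A raises IndexError, B returns ['U-drug']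
-- crash fix: A raises IndexError on the empty input and on a length-1 input whose ctype[0] is not None (the endpoint blocks index out of range); B returns [] resp. the natural single U tag there. — e.g. on apply_bilou([some "drug"], [some "d1"]): A raises IndexError, B returns ["U-drug"]
import Mathlib
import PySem

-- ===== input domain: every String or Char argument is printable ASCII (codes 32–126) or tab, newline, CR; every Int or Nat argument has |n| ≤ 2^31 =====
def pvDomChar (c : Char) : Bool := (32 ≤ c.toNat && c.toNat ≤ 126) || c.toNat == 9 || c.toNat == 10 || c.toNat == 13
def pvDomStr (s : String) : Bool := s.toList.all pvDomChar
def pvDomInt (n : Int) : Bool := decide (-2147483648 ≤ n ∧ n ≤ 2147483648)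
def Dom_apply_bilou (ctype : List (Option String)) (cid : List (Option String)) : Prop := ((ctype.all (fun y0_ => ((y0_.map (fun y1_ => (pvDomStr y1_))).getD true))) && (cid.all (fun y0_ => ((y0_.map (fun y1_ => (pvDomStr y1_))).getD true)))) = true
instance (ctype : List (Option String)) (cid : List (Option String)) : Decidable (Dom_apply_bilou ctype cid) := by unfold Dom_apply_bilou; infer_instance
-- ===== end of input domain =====

-- B replaces A's four overwriting passes plus the two endpoint-override blocks by a single pass
-- that decides each token's BILOU tag directly from its neighbours (objective: simpler, one pass).

-- '{}-{}'.format(p, t) where t is an Option String (str(None) = "None"); used by both ports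
def pvFmt (p : String) (t : Option String) : String := p ++ "-" ++ t.getD "None"

-- ===== PORT A =====
-- A's four in-place passes, each a helper: list indexing cid[i] / ctype[i] is always in range on
-- Pre_ inputs (including the negative-index wraparound cid[i-1] at i=0 and cid[-1]/cid[-2] in the
-- endpoint blocks), so the getD/pyGetD defaults below are never reached inside Pre_.
def pvPassI (ctype cid : List (Option String)) (tags : List String) : List String :=
  (List.range cid.length).foldl (fun t i =>
    if cid.getD i none = none then t
    else t.set i (pvFmt "I" (ctype.getD i none))) tags

def pvPassB (ctype cid : List (Option String)) (tags : List String) : List String :=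
  (List.range' 1 (cid.length - 1)).foldl (fun t i =>
    if ctype.getD i none ≠ none ∧ cid.getD i none ≠ cid.getD (i - 1) none
    then t.set i (pvFmt "B" (ctype.getD i none)) else t) tags

def pvPassL (ctype cid : List (Option String)) (tags : List String) : List String :=
  (List.range (cid.length - 1)).foldl (fun t i =>
    if ctype.getD i none ≠ none ∧ cid.getD i none ≠ cid.getD (i + 1) none
    then t.set i (pvFmt "L" (ctype.getD i none)) else t) tags

def pvPassU (ctype cid : List (Option String)) (tags : List String) : List String :=
  (List.range (cid.length - 1)).foldl (fun t i =>
    if ctype.getD i none ≠ none ∧ cid.getD i none ≠ cid.getD (i + 1) none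
       ∧ cid.getD i none ≠ PySem.List.pyGetD cid ((i : Int) - 1) none
    then t.set i (pvFmt "U" (ctype.getD i none)) else t) tags

def apply_bilou (ctype : List (Option String)) (cid : List (Option String)) : List String :=
  let n := cid.length
  let t4 := pvPassU ctype cid (pvPassL ctype cid (pvPassB ctype cid
              (pvPassI ctype cid (List.replicate n "O"))))
  let t5 := if ctype.getD 0 none ≠ none then
      (if cid.getD 0 none ≠ cid.getD 1 none then t4.set 0 (pvFmt "U" (ctype.getD 0 none))
       else t4.set 0 (pvFmt "B" (ctype.getD 0 none))) else t4
  if PySem.List.pyGetD ctype (-1) none ≠ none then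
      (if PySem.List.pyGetD cid (-1) none ≠ PySem.List.pyGetD cid (-2) none
       then t5.set (n - 1) (pvFmt "U" (PySem.List.pyGetD ctype (-1) none))
       else t5.set (n - 1) (pvFmt "L" (PySem.List.pyGetD ctype (-1) none))) else t5

-- ===== PORT B =====
def apply_bilou_alt (ctype : List (Option String)) (cid : List (Option String)) : List String :=
  let n := cid.length
  (List.range n).map (fun i =>
    match ctype.getD i none with
    | none => if cid.getD i none ≠ none then pvFmt "I" none else "O"
    | some t =>
      if i = 0 then
        (if n = 1 ∨ cid.getD 0 none ≠ cid.getD 1 none then pvFmt "U" (some t)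
         else pvFmt "B" (some t))
      else if i = n - 1 then
        (if cid.getD i none ≠ cid.getD (i - 1) none then pvFmt "U" (some t)
         else pvFmt "L" (some t))
      else if cid.getD i none ≠ cid.getD (i - 1) none ∧ cid.getD i none ≠ cid.getD (i + 1) none
        then pvFmt "U" (some t)
      else if cid.getD i none ≠ cid.getD (i + 1) none then pvFmt "L" (some t)
      else if cid.getD i none ≠ cid.getD (i - 1) none then pvFmt "B" (some t)
      else if cid.getD i none ≠ none then pvFmt "I" (some t) else "O")

-- ===== PRECONDITION & SPEC =====
-- Pre_ excludes inputs where A raises: unequal lengths (AssertionError), the empty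
-- input and the length-1 input with ctype[0] not None (IndexError in the endpoint blocks).
def Pre_apply_bilou (ctype : List (Option String)) (cid : List (Option String)) : Prop :=
  ctype.length = cid.length ∧ (2 ≤ cid.length ∨ (cid.length = 1 ∧ ctype = [none]))
instance (ctype : List (Option String)) (cid : List (Option String)) : Decidable (Pre_apply_bilou ctype cid) := by unfold Pre_apply_bilou; infer_instance
def pvWitness_apply_bilou : List (Option String) × List (Option String) :=
  ([some "drug", none], [some "d1", none])

-- A raises IndexError on the empty input and on length-1 input with ctype[0] not None; B returns the natural tagging ([] resp. a single U tag) there.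
def Raises_apply_bilou (ctype : List (Option String)) (cid : List (Option String)) : Prop :=
  ctype.length = cid.length ∧ (cid.length = 0 ∨ (cid.length = 1 ∧ ctype.getD 0 none ≠ none))
instance (ctype : List (Option String)) (cid : List (Option String)) : Decidable (Raises_apply_bilou ctype cid) := by unfold Raises_apply_bilou; infer_instance
def pvRaiseWitness_apply_bilou : List (Option String) × List (Option String) :=
  ([some "drug"], [some "d1"])
def pvRaiseWitnessOut_apply_bilou : List String := ["U-drug"]

def Spec_apply_bilou (ctype : List (Option String)) (cid : List (Option String)) (out : List String) : Prop := out = apply_bilou_alt ctype cid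
instance (ctype : List (Option String)) (cid : List (Option String)) (out : List String) : Decidable (Spec_apply_bilou ctype cid out) := by unfold Spec_apply_bilou; infer_instance

-- ===== CLAIM (what is proved, stated in full; the proofs are below) =====
def Claim_equal_apply_bilou : Prop := ∀ (ctype : List (Option String)) (cid : List (Option String)), Dom_apply_bilou ctype cid → Pre_apply_bilou ctype cid → Spec_apply_bilou ctype cid (apply_bilou ctype cid)
def Claim_raises_apply_bilou : Prop := (∀ (ctype : List (Option String)) (cid : List (Option String)), Dom_apply_bilou ctype cid → Raises_apply_bilou ctype cid → ¬ Pre_apply_bilou ctype cid) ∧ (Dom_apply_bilou (pvRaiseWitness_apply_bilou.1) (pvRaiseWitness_apply_bilou.2) ∧ Raises_apply_bilou (pvRaiseWitness_apply_bilou.1) (pvRaiseWitness_apply_bilou.2) ∧ apply_bilou_alt (pvRaiseWitness_apply_bilou.1) (pvRaiseWitness_apply_bilou.2) = pvRaiseWitnessOut_apply_bilou)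

-- ===== LEMMAS AND PROOFS =====

-- length of one conditional-set pass
lemma pass_length (p : Nat → Prop) [DecidablePred p] (f : Nat → String)
    (idxs : List Nat) (tags : List String) :
    (idxs.foldl (fun t i => if p i then t.set i (f i) else t) tags).length = tags.length := by
  induction idxs generalizing tags with
  | nil => rfl
  | cons i is ih =>
    simp only [List.foldl_cons]
    rw [ih]; split <;> simp

-- value of one conditional-set pass at an in-range index
lemma pass_getD (p : Nat → Prop) [DecidablePred p] (f : Nat → String)
    (idxs : List Nat) (tags : List String) (j : Nat) (d : String) (hj : j < tags.length) :
    (idxs.foldl (fun t i => if p i then t.set i (f i) else t) tags).getD j d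
      = if j ∈ idxs ∧ p j then f j else tags.getD j d := by
  induction idxs generalizing tags with
  | nil => simp
  | cons i is ih =>
    simp only [List.foldl_cons]
    have hlen : (if p i then tags.set i (f i) else tags).length = tags.length := by
      split <;> simp
    rw [ih _ (hlen ▸ hj)]
    have hstep : (if p i then tags.set i (f i) else tags).getD j d
        = if j = i ∧ p i then f i else tags.getD j d := by
      by_cases hpi : p i
      · simp only [hpi, if_true, and_true]
        by_cases hji : j = i
        · subst hji; simp [List.getD_eq_getElem?_getD, List.getElem?_set, hj]
        · simp [List.getD_eq_getElem?_getD, List.getElem?_set, Ne.symm hji, hji]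
      · simp [hpi]
    rw [hstep]
    by_cases hpj : p j <;> by_cases hjis : j ∈ is <;> by_cases hji : j = i <;>
      simp_all [List.mem_cons]

lemma pass_length' (c : Nat → Prop) [DecidablePred c] (f : Nat → String)
    (idxs : List Nat) (tags : List String) :
    (idxs.foldl (fun t i => if c i then t else t.set i (f i)) tags).length = tags.length := by
  induction idxs generalizing tags with
  | nil => rfl
  | cons i is ih =>
    simp only [List.foldl_cons]
    rw [ih]; split <;> simp

lemma pass_getD' (c : Nat → Prop) [DecidablePred c] (f : Nat → String)
    (idxs : List Nat) (tags : List String) (j : Nat) (d : String) (hj : j < tags.length) :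
    (idxs.foldl (fun t i => if c i then t else t.set i (f i)) tags).getD j d
      = if j ∈ idxs ∧ ¬ c j then f j else tags.getD j d := by
  have he : (fun (t : List String) (i : Nat) => if c i then t else t.set i (f i))
      = (fun t i => if ¬ c i then t.set i (f i) else t) := by
    funext t i; by_cases h : c i <;> simp [h]
  rw [he, pass_getD (fun i => ¬ c i) f idxs tags j d hj]

theorem set_getD (l : List String) (i j : Nat) (a : String) (d : String) :
    (l.set i a).getD j d = if j = i ∧ i < l.length then a else l.getD j d := by
  by_cases hlt : i < l.length
  · by_cases hji : j = i
    · subst hji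
      rw [List.getD_eq_getElem _ _ (by simpa using hlt)]
      simp [List.getElem_set_self, hlt]
    · simp [List.getD_eq_getElem?_getD, List.getElem?_set, hji, Ne.symm hji]
  · rw [List.set_eq_of_length_le (by omega)]
    simp [hlt]

lemma pvPassI_length (ctype cid : List (Option String)) (tags : List String) :
    (pvPassI ctype cid tags).length = tags.length := by
  unfold pvPassI; exact pass_length' _ _ _ _

lemma pvPassB_length (ctype cid : List (Option String)) (tags : List String) :
    (pvPassB ctype cid tags).length = tags.length := by
  unfold pvPassB; exact pass_length _ _ _ _

lemma pvPassL_length (ctype cid : List (Option String)) (tags : List String) :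
    (pvPassL ctype cid tags).length = tags.length := by
  unfold pvPassL; exact pass_length _ _ _ _

lemma pvPassU_length (ctype cid : List (Option String)) (tags : List String) :
    (pvPassU ctype cid tags).length = tags.length := by
  unfold pvPassU; exact pass_length _ _ _ _

lemma pvPassI_getD (ctype cid : List (Option String)) (tags : List String)
    (j : Nat) (d : String) (hj : j < tags.length) :
    (pvPassI ctype cid tags).getD j d
      = if j < cid.length ∧ ¬ cid.getD j none = none then pvFmt "I" (ctype.getD j none)
        else tags.getD j d := by
  unfold pvPassI
  rw [pass_getD' _ _ _ _ _ _ hj]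
  simp [List.mem_range]

lemma pvPassB_getD (ctype cid : List (Option String)) (tags : List String)
    (j : Nat) (d : String) (hj : j < tags.length) :
    (pvPassB ctype cid tags).getD j d
      = if (1 ≤ j ∧ j < 1 + (cid.length - 1)) ∧ ctype.getD j none ≠ none
            ∧ cid.getD j none ≠ cid.getD (j - 1) none
        then pvFmt "B" (ctype.getD j none) else tags.getD j d := by
  unfold pvPassB
  rw [pass_getD _ _ _ _ _ _ hj]
  simp [List.mem_range'_1]

lemma pvPassL_getD (ctype cid : List (Option String)) (tags : List String)
    (j : Nat) (d : String) (hj : j < tags.length) :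
    (pvPassL ctype cid tags).getD j d
      = if j < cid.length - 1 ∧ ctype.getD j none ≠ none
            ∧ cid.getD j none ≠ cid.getD (j + 1) none
        then pvFmt "L" (ctype.getD j none) else tags.getD j d := by
  unfold pvPassL
  rw [pass_getD _ _ _ _ _ _ hj]
  simp [List.mem_range]

lemma pvPassU_getD (ctype cid : List (Option String)) (tags : List String)
    (j : Nat) (d : String) (hj : j < tags.length) :
    (pvPassU ctype cid tags).getD j d
      = if j < cid.length - 1 ∧ ctype.getD j none ≠ none
            ∧ cid.getD j none ≠ cid.getD (j + 1) none
            ∧ cid.getD j none ≠ PySem.List.pyGetD cid ((j : Int) - 1) none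
        then pvFmt "U" (ctype.getD j none) else tags.getD j d := by
  unfold pvPassU
  rw [pass_getD _ _ _ _ _ _ hj]
  simp [List.mem_range]

lemma A_length (ctype cid : List (Option String)) :
    (apply_bilou ctype cid).length = cid.length := by
  simp only [apply_bilou]
  split_ifs <;>
    simp [pvPassI_length, pvPassB_length, pvPassL_length, pvPassU_length]

lemma elem_eq (ctype cid : List (Option String))
    (hlen : ctype.length = cid.length) (h2 : 2 ≤ cid.length)
    (j : Nat) (hj : j < cid.length) :
    (apply_bilou ctype cid).getD j "O" =
      (apply_bilou_alt ctype cid).getD j "O" := by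
  have hB : (apply_bilou_alt ctype cid).getD j "O" = (fun i =>
    match ctype.getD i none with
    | none => if cid.getD i none ≠ none then pvFmt "I" none else "O"
    | some t =>
      if i = 0 then
        (if cid.length = 1 ∨ cid.getD 0 none ≠ cid.getD 1 none then pvFmt "U" (some t)
         else pvFmt "B" (some t))
      else if i = cid.length - 1 then
        (if cid.getD i none ≠ cid.getD (i - 1) none then pvFmt "U" (some t)
         else pvFmt "L" (some t))
      else if cid.getD i none ≠ cid.getD (i - 1) none ∧ cid.getD i none ≠ cid.getD (i + 1) none
        then pvFmt "U" (some t)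
      else if cid.getD i none ≠ cid.getD (i + 1) none then pvFmt "L" (some t)
      else if cid.getD i none ≠ cid.getD (i - 1) none then pvFmt "B" (some t)
      else if cid.getD i none ≠ none then pvFmt "I" (some t) else "O") j := by
    simp only [apply_bilou_alt]
    rw [List.getD_eq_getElem _ _ (by simpa using hj)]
    simp [hj]
  rw [hB]
  have hc1 : PySem.List.pyGetD ctype (-1) none = ctype.getD (cid.length - 1) none := by
    rw [PySem.List.pyGetD_neg_ofNat ctype 1 none (by omega) (by omega)]
    rw [List.getD_eq_getElem _ _ (by omega)]
    congr 1; omega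
  have hc2 : PySem.List.pyGetD cid (-1) none = cid.getD (cid.length - 1) none := by
    rw [PySem.List.pyGetD_neg_ofNat cid 1 none (by omega) (by omega)]
    rw [List.getD_eq_getElem _ _ (by omega)]
  have hc3 : PySem.List.pyGetD cid (-2) none = cid.getD (cid.length - 2) none := by
    rw [PySem.List.pyGetD_neg_ofNat cid 2 none (by omega) (by omega)]
    rw [List.getD_eq_getElem _ _ (by omega)]
  simp only [apply_bilou, hc1, hc2, hc3]
  simp only [set_getD, apply_ite (List.getD · j "O"), apply_ite List.length,
    pvPassI_length, pvPassB_length, pvPassL_length, pvPassU_length, List.length_replicate,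
    hj, pvPassU_getD, pvPassL_getD, pvPassB_getD, pvPassI_getD, List.getD_replicate, hj]
  simp only [List.length_set, pvPassU_length, pvPassL_length, pvPassB_length, pvPassI_length,
    List.length_replicate]
  by_cases hj0 : j = 0
  · subst hj0
    rcases hC0 : ctype.getD 0 none with _ | t
    · simp [hC0, (by omega : ¬ (0 = cid.length - 1)), hj]
      intro _
      split_ifs <;> first | rfl | omega
    · simp [hC0, (by omega : ¬ (0 = cid.length - 1)), (by omega : ¬ cid.length = 1), hj,
        (by omega : 0 < cid.length)]
      split_ifs <;> first | rfl | omega | tauto | (simp_all; omega) | simp_all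
  · by_cases hjl : j = cid.length - 1
    · subst hjl
      have e1 : cid.length - 1 - 1 = cid.length - 2 := by omega
      rcases hCl : ctype.getD (cid.length - 1) none with _ | t
      · simp [hCl, e1, (by omega : ¬ (cid.length - 1 < cid.length - 1)), hj]
        try split_ifs <;> first | rfl | omega | tauto | (simp_all; omega) | simp_all
      · simp [hCl, e1, (by omega : ¬ (cid.length - 1 < cid.length - 1)),
          (by omega : ¬ (cid.length - 1 = 0)), (by omega : cid.length - 1 < cid.length), hj]
        try split_ifs <;> first | rfl | omega | tauto | (simp_all; omega) | simp_all
    · have hcast : ((j : Int) - 1) = ((j - 1 : Nat) : Int) := by omega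
      rw [hcast, PySem.List.pyGetD_natCast]
      rcases hC : ctype.getD j none with _ | t
      · simp [hC, hj0, hjl, (by omega : j < cid.length - 1), hj,
          (by omega : 1 ≤ j), (by omega : j < 1 + (cid.length - 1))]
        try split_ifs <;> first | rfl | omega | tauto | (simp_all; omega) | simp_all
      · simp [hC, hj0, hjl, (by omega : j < cid.length - 1), hj,
          (by omega : 1 ≤ j), (by omega : j < 1 + (cid.length - 1))]
        try split_ifs <;> first | rfl | omega | tauto | (simp_all; omega) | simp_all

theorem apply_bilou_spec : Claim_equal_apply_bilou := by
  intro ctype cid _ hpre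
  unfold Spec_apply_bilou
  obtain ⟨hlen, hcase⟩ := hpre
  rcases hcase with h2 | ⟨h1, hct⟩
  · apply List.ext_getElem
    · rw [A_length]; simp [apply_bilou_alt]
    · intro j hjA hjB
      have hj : j < cid.length := by rw [A_length] at hjA; exact hjA
      have h := elem_eq ctype cid hlen h2 j hj
      rw [List.getD_eq_getElem _ _ hjA, List.getD_eq_getElem _ _ hjB] at h
      exact h
  · subst hct
    rcases cid with _ | ⟨c, _ | ⟨c2, rest⟩⟩
    · simp at h1
    · rcases c with _ | s <;> rfl
    · simp at h1

@[simp]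
theorem apply_bilou_raises : Claim_raises_apply_bilou := by
  unfold Claim_raises_apply_bilou
  constructor
  · rintro ctype cid _ ⟨hlen, hcase⟩ ⟨hlen', hcase'⟩
    rcases hcase with h0 | ⟨h1, hne⟩
    · omega
    · rcases hcase' with h2 | ⟨_, hct⟩
      · omega
      · subst hct; simp at hne
  · exact ⟨by decide, by decide, by decide⟩
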